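-- pv_equiv track=rewrite | github.com/MegaGeese/Coding-Practice | Christmas Tree Hash/ChristmasTreeHash.py | stepFour
-- ===== SOURCE A (Python) =====
-- def stepFour(character):
--     a = ''
--     b = ''
--     char = ''
--     bitwiseAnd = ''
--
--     for i in character:
--         char += str(bin(i)[2:])
--
--     a = char[:16]
--     b = char[-16:]
--
--     for i in range(len(a)):
--         bitA = a[i]
--         bitB = b[i]
--
--         if bitA == bitB and bitA == '1':
--             bitwiseAnd += '1'
--         else:
--             bitwiseAnd += '0'
--
--     return int(bitwiseAnd, 2)
-- ===== SOURCE B (Python) =====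
-- def stepFour(character):
--     char = ''.join(bin(i)[2:] for i in character)
--     a = char[:16]
--     b = char[-16:]
--     va = 0
--     for c in a:
--         va = va * 2 + (c == '1')
--     vb = 0
--     for c in b:
--         vb = vb * 2 + (c == '1')
--     return va & vb
-- ===== Notes on version B (the rewrite author's own statement) =====
-- stated objective: idiomatic
-- what changed: A builds a '0'/'1' result string with a 16-iteration per-bit matching loop and then parses it with int(s,2); B converts the two 16-character slices to integers directly and combines them with Python's native bitwise &.
import Mathlib
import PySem

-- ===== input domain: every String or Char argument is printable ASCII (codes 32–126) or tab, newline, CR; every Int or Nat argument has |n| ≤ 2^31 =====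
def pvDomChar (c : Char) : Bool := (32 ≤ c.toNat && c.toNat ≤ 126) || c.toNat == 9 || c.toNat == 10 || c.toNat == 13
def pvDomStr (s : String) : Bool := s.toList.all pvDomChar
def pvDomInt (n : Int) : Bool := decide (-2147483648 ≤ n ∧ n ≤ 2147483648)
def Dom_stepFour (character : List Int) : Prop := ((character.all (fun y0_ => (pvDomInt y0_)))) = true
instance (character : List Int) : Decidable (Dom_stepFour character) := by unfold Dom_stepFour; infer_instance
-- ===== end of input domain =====

-- B replaces A's 16-step bit-matching string loop (build a '0'/'1' string, then parse it with
-- int(·, 2)) by two Horner folds of the slices into integers combined with Python's native `&`.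

-- ===== PORT A =====
-- Hand port of Python's `int(s, 2)` for the strings this program builds (bitwiseAnd consists of
-- '0'/'1' characters only): on such strings int(s, 2) is exactly this left-to-right fold, and it
-- raises ValueError exactly on the empty string (`none` here).  (The PySem primitive
-- PySem.Int.ofCharsBase? has a private recursion that cannot be cited in proofs.)
def pyInt2? (s : List Char) : Option Int :=
  if s = [] then none
  else some (s.foldl (fun acc c => acc * 2 + (if c = '1' then 1 else 0)) 0)

def stepFour (character : List Int) : Int :=
  -- char += str(bin(i)[2:])   (str(·) of a string is the identity)
  let char : List Char :=
    character.foldl (fun acc i => acc ++ PySem.List.slice (PySem.Int.toBinChars0b i) (some 2) none) []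
  let a := PySem.List.slice char none (some 16)
  let b := PySem.List.slice char (some (-16)) none
  let bitwiseAnd : List Char :=
    (PySem.List.pyRange 0 (PySem.List.len a)).foldl
      (fun acc i =>
        let bitA := (PySem.List.pyGet? a i).getD ' '
        let bitB := (PySem.List.pyGet? b i).getD ' '
        if bitA = bitB ∧ bitA = '1' then acc ++ ['1'] else acc ++ ['0'])
      []
  (pyInt2? bitwiseAnd).getD 0   -- int(bitwiseAnd, 2); none (ValueError) excluded by Pre_

-- ===== PORT B =====
def stepFour_alt (character : List Int) : Int :=
  let char : List Char :=
    (character.map (fun i => PySem.List.slice (PySem.Int.toBinChars0b i) (some 2) none)).flatten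
  let a := PySem.List.slice char none (some 16)
  let b := PySem.List.slice char (some (-16)) none
  let va : Int := a.foldl (fun acc c => acc * 2 + (if c = '1' then 1 else 0)) 0
  let vb : Int := b.foldl (fun acc c => acc * 2 + (if c = '1' then 1 else 0)) 0
  PySem.Int.band va vb

-- ===== PRECONDITION & SPEC =====
-- Pre_ excludes only the empty list, on which Python's A raises ValueError (int('', 2)).
def Pre_stepFour (character : List Int) : Prop := character ≠ []
instance (character : List Int) : Decidable (Pre_stepFour character) := by
  unfold Pre_stepFour; infer_instance

def pvWitness_stepFour : List Int := ([5, -3, 1000])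

def Spec_stepFour (character : List Int) (out : Int) : Prop := out = stepFour_alt character
instance (character : List Int) (out : Int) : Decidable (Spec_stepFour character out) := by
  unfold Spec_stepFour; infer_instance

-- ===== CLAIM (what is proved, stated in full; the proofs are below) =====
def Claim_equal_stepFour : Prop :=
  ∀ (character : List Int), Dom_stepFour character → Pre_stepFour character →
    Spec_stepFour character (stepFour character)

-- ===== LEMMAS AND PROOFS =====

-- bit of a character, as Python's `c == '1'` used in B's Horner folds
def pvBit (c : Char) : Nat := if c = '1' then 1 else 0

-- the Horner fold over Nat
def pvH (s : List Char) (acc : Nat) : Nat := s.foldl (fun acc c => acc * 2 + pvBit c) acc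

-- A's AND-character
def pvAndC (x y : Char) : Char := if x = y ∧ x = '1' then '1' else '0'

theorem pvBit_lt (c : Char) : pvBit c < 2 := by unfold pvBit; split <;> omega

theorem pvBit_andC (x y : Char) : pvBit (pvAndC x y) = pvBit x &&& pvBit y := by
  unfold pvAndC pvBit
  by_cases hx : x = '1' <;> by_cases hy : y = '1' <;> simp [hx, hy, eq_comm]

theorem pvNat_and_bit (m n x y : Nat) (hx : x < 2) (hy : y < 2) :
    (2*m+x) &&& (2*n+y) = 2*(m &&& n) + (x &&& y) := by
  have hb : ∀ (b : Bool) (k : Nat), Nat.bit b k = 2*k + b.toNat := by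
    intro b k; cases b <;> simp [Nat.bit, Bool.toNat]
  have := Nat.bitwise_bit (f := and) (m := m) (n := n) (a := decide (x = 1)) (b := decide (y = 1))
    (by simp)
  simp only [hb] at this
  have ex : (decide (x = 1)).toNat = x := by interval_cases x <;> simp
  have ey : (decide (y = 1)).toNat = y := by interval_cases y <;> simp
  have exy : (decide (x = 1) && decide (y = 1)).toNat = x &&& y := by
    interval_cases x <;> interval_cases y <;> simp
  rw [ex, ey, exy] at this
  simpa [HAnd.hAnd, AndOp.and, Nat.land] using this

-- the central identity: the Horner value of the AND-string is the AND of the Horner values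
theorem pvH_zip (a : List Char) : ∀ (b : List Char), a.length = b.length → ∀ (m n : Nat),
    pvH (List.zipWith pvAndC a b) (m &&& n) = pvH a m &&& pvH b n := by
  induction a with
  | nil => intro b hb m n; simp [List.length_eq_zero_iff.mp hb.symm, pvH]
  | cons x a ih =>
    intro b hb m n
    cases b with
    | nil => simp at hb
    | cons y b =>
      simp only [List.zipWith_cons_cons, pvH, List.foldl_cons] at *
      have key : (m &&& n) * 2 + pvBit (pvAndC x y) = (m*2 + pvBit x) &&& (n*2 + pvBit y) := by
        rw [pvBit_andC, Nat.mul_comm (m &&& n) 2, Nat.mul_comm m 2, Nat.mul_comm n 2]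
        exact (pvNat_and_bit m n _ _ (pvBit_lt x) (pvBit_lt y)).symm
      rw [key]
      exact ih b (by simpa using hb) _ _

-- the two slices have the same length
theorem pvLen_slices {α : Type} (char : List α) :
    (PySem.List.slice char none (some 16)).length
      = (PySem.List.slice char (some (-16)) none).length := by
  simp [PySem.List.slice, PySem.List.clampIdx]
  split_ifs <;> omega

-- indexed map over range = zipWith
theorem pvMap_range_zip (f : Char → Char → Char) :
    ∀ (a b : List Char), a.length = b.length →
      (List.range a.length).map (fun k => f (a[k]?.getD ' ') (b[k]?.getD ' '))
        = List.zipWith f a b := by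
  intro a
  induction a with
  | nil => intro b hb; simp
  | cons x a ih =>
    intro b hb
    cases b with
    | nil => simp at hb
    | cons y b =>
      simp only [List.length_cons, List.range_succ_eq_map, List.map_cons, List.map_map,
        List.zipWith_cons_cons]
      refine congrArg₂ _ (by simp) ?_
      rw [← ih b (by simpa using hb)]
      exact List.map_congr_left (by intro k hk; simp [Function.comp, Nat.succ_eq_add_one])

-- A's index loop builds exactly the zipWith of pvAndC
theorem pvLoop_eq (a b : List Char) (hab : a.length = b.length) :
    (PySem.List.pyRange 0 (PySem.List.len a)).foldl
      (fun acc i =>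
        let bitA := (PySem.List.pyGet? a i).getD ' '
        let bitB := (PySem.List.pyGet? b i).getD ' '
        if bitA = bitB ∧ bitA = '1' then acc ++ ['1'] else acc ++ ['0'])
      []
      = List.zipWith pvAndC a b := by
  rw [PySem.List.len_eq, PySem.List.pyRange_zero_natCast, List.foldl_map]
  rw [PySem.List.foldl_congr_mem _ _
    (fun acc k => acc ++ [pvAndC (a[k]?.getD ' ') (b[k]?.getD ' ')]) _ ?_]
  · rw [PySem.List.foldl_append_singleton_eq_map, List.nil_append, pvMap_range_zip _ a b hab]
  · intro acc k _
    simp only [PySem.List.pyGet?_natCast, pvAndC]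
    split <;> rfl

-- the Int Horner fold is the Nat Horner fold, cast
theorem pvFold_int (s : List Char) : ∀ (acc : Nat),
    s.foldl (fun acc c => acc * 2 + (if c = '1' then 1 else 0)) (acc : Int)
      = ((pvH s acc : Nat) : Int) := by
  induction s with
  | nil => intro acc; simp [pvH]
  | cons c s ih =>
    intro acc
    simp only [List.foldl_cons, pvH, pvBit]
    have : ((acc : Int) * 2 + (if c = '1' then 1 else 0))
        = ((acc * 2 + (if c = '1' then 1 else 0) : Nat) : Int) := by
      split <;> push_cast <;> ring
    rw [this, ih]
    simp [pvH, pvBit]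

-- ===== VERDICT (by name: the statement is the Claim_ definition above) =====
theorem stepFour_spec : Claim_equal_stepFour := by
  intro character _ _
  unfold Spec_stepFour stepFour stepFour_alt
  dsimp only
  rw [PySem.List.foldl_append_eq_flatMap, List.nil_append, ← List.flatMap_def]
  set char : List Char :=
    character.flatMap (fun i => PySem.List.slice (PySem.Int.toBinChars0b i) (some 2) none)
  set a := PySem.List.slice char none (some 16) with ha
  set b := PySem.List.slice char (some (-16)) none with hb
  have hab : a.length = b.length := by rw [ha, hb]; exact pvLen_slices char
  rw [pvLoop_eq a b hab]
  have hva := pvFold_int a 0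
  have hvb := pvFold_int b 0
  norm_num at hva hvb
  rw [hva, hvb, PySem.Int.band_natCast]
  cases hs : List.zipWith pvAndC a b with
  | nil =>
    rcases List.zipWith_eq_nil_iff.mp hs with h | h
    · have hb0 : b = [] := List.length_eq_zero_iff.mp (by rw [← hab, h]; rfl)
      simp [pyInt2?, h, hb0, pvH]
    · have ha0 : a = [] := List.length_eq_zero_iff.mp (by rw [hab, h]; rfl)
      simp [pyInt2?, h, ha0, pvH]
  | cons c s =>
    rw [← hs, pyInt2?]
    have hne : List.zipWith pvAndC a b ≠ [] := by rw [hs]; exact List.cons_ne_nil _ _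
    rw [if_neg hne, Option.getD_some]
    have := pvFold_int (List.zipWith pvAndC a b) 0
    norm_num at this
    rw [this]
    have hz : pvH (List.zipWith pvAndC a b) 0 = pvH a 0 &&& pvH b 0 := by
      have := pvH_zip a b hab 0 0
      simpa using this
    rw [hz]
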